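-- pv_equiv track=rewrite | github.com/JustAHobbyDev/cortex | scripts/phase4_promotion_candidate_harness_v0.py | _query_tokens
-- ===== SOURCE A (Python) =====
-- def _query_tokens(query: str) -> list[str]:
--     tokens: list[str] = []
--     current: list[str] = []
--     for ch in query.lower():
--         if ch.isalnum():
--             current.append(ch)
--             continue
--         if current:
--             token = "".join(current)
--             if len(token) >= 3:
--                 tokens.append(token)
--             current = []
--     if current:
--         token = "".join(current)
--         if len(token) >= 3:
--             tokens.append(token)
--     return sorted(set(tokens))
-- ===== SOURCE B (Python) =====
-- def _query_tokens(query: str) -> list[str]: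
--     runs = []
--     s = query.lower()
--     while s:
--         if s[0].isalnum():
--             j = 1
--             while j < len(s) and s[j].isalnum():
--                 j += 1
--             runs.append(s[:j])
--             s = s[j:]
--         else:
--             s = s[1:]
--     return sorted({t for t in runs if len(t) >= 3})
-- ===== Notes on version B (the rewrite author's own statement) =====
-- stated objective: simpler
-- what changed: Replaces the per-character accumulator state machine (mutable current buffer, flush-on-delimiter plus a duplicated end-of-string flush) with a span scanner that cuts each maximal alphanumeric run off the front of the string in one step, then filters and sorts a set comprehension.
import Mathlib
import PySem

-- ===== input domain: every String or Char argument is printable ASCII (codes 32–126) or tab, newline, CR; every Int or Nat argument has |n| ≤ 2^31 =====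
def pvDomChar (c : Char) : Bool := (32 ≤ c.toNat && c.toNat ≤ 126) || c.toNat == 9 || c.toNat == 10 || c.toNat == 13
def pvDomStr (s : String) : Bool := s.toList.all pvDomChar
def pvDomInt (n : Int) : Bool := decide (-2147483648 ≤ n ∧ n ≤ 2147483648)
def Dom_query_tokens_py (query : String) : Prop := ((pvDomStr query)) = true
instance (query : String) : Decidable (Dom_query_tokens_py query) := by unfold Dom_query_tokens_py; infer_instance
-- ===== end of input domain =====

-- B replaces A's per-character accumulator state machine with a span scanner over maximal
-- alphanumeric runs plus a filtered set comprehension (objective: simpler).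

-- ===== PORT A =====
-- one iteration of A's for-loop; state = (tokens, current); len("".join(current)) = current.length
def pvAStep (st : List String × List Char) (ch : Char) : List String × List Char :=
  if PySem.Chars.isalnum ch then (st.1, st.2 ++ [ch])
  else if st.2 ≠ [] then
    (if 3 ≤ st.2.length then st.1 ++ [String.ofList st.2] else st.1, [])
  else (st.1, st.2)

-- the trailing 'if current:' flush after the loop
def pvAFinal (st : List String × List Char) : List String :=
  if st.2 ≠ [] then
    (if 3 ≤ st.2.length then st.1 ++ [String.ofList st.2] else st.1)
  else st.1

def query_tokens_py (query : String) : List String :=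
  PySem.List.sorted
    (PySem.Set.ofList (pvAFinal ((PySem.Chars.lower query.toList).foldl pvAStep ([], []))))
    (fun x => x) false

-- ===== PORT B =====
-- B's outer while-loop: cut a maximal alphanumeric run off the front (the inner while that
-- advances j is the takeWhile/dropWhile split s[:j] / s[j:]), else drop one character
def pvBRuns (s : List Char) : List (List Char) :=
  match s with
  | [] => []
  | c :: rest =>
    if PySem.Chars.isalnum c then
      (c :: rest.takeWhile (fun d => PySem.Chars.isalnum d))
        :: pvBRuns (rest.dropWhile (fun d => PySem.Chars.isalnum d))
    else pvBRuns rest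
termination_by s.length
decreasing_by
  · have := List.length_dropWhile_le (fun d => PySem.Chars.isalnum d) rest
    simp; omega
  · simp

def query_tokens_py_alt (query : String) : List String :=
  PySem.List.sorted
    (PySem.Set.ofList
      (((pvBRuns (PySem.Chars.lower query.toList)).filter (fun t => 3 ≤ t.length)).map String.ofList))
    (fun x => x) false

-- ===== PRECONDITION & SPEC =====
def Spec_query_tokens_py (query : String) (out : List String) : Prop := out = query_tokens_py_alt query
instance (query : String) (out : List String) : Decidable (Spec_query_tokens_py query out) := by unfold Spec_query_tokens_py; infer_instance

-- ===== CLAIM (what is proved, stated in full; the proofs are below) =====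
def Claim_equal_query_tokens_py : Prop := ∀ (query : String), Dom_query_tokens_py query → Spec_query_tokens_py query (query_tokens_py query)

-- ===== LEMMAS AND PROOFS =====

-- the token a flush of buffer c emits (possibly none)
def pvEmit (c : List Char) : List String :=
  if 3 ≤ c.length then [String.ofList c] else []

-- closed recursion of A's loop body over the remaining characters, buffer c pending
def pvG (c : List Char) : List Char → List String
  | [] => pvEmit c
  | ch :: cs =>
    if PySem.Chars.isalnum ch then pvG (c ++ [ch]) cs
    else pvEmit c ++ pvG [] cs

lemma pvFold_eq (cs : List Char) : ∀ (t : List String) (c : List Char),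
    pvAFinal (cs.foldl pvAStep (t, c)) = t ++ pvG c cs := by
  induction cs with
  | nil =>
    intro t c
    simp only [List.foldl_nil, pvAFinal, pvG, pvEmit]
    by_cases hc : c = [] <;> simp [hc] <;> split_ifs <;> simp_all
  | cons ch cs ih =>
    intro t c
    rw [List.foldl_cons]
    by_cases h : PySem.Chars.isalnum ch
    · rw [show pvAStep (t, c) ch = (t, c ++ [ch]) from by simp [pvAStep, h]]
      rw [ih]
      simp [pvG, h]
    · by_cases hc : c = []
      · rw [show pvAStep (t, c) ch = (t, c) from by simp [pvAStep, h, hc]]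
        rw [ih]
        simp [pvG, h, hc, pvEmit]
      · rw [show pvAStep (t, c) ch = (if 3 ≤ c.length then t ++ [String.ofList c] else t, []) from
          by simp [pvAStep, h, hc]]
        split_ifs with h3 <;> (rw [ih]; simp [pvG, h, pvEmit, h3])

lemma pvG_split (cs : List Char) : ∀ (c : List Char),
    pvG c cs = pvEmit (c ++ cs.takeWhile (fun d => PySem.Chars.isalnum d))
      ++ pvG [] (cs.dropWhile (fun d => PySem.Chars.isalnum d)) := by
  induction cs with
  | nil => intro c; simp [pvG, pvEmit]
  | cons ch cs ih =>
    intro c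
    by_cases h : PySem.Chars.isalnum ch
    · simp only [pvG, h, if_true, List.takeWhile_cons, List.dropWhile_cons]
      rw [ih (c ++ [ch])]
      simp
    · rw [show pvG c (ch :: cs) = pvEmit c ++ pvG [] cs from by simp [pvG, h]]
      rw [List.takeWhile_cons_of_neg (by simp [h]), List.dropWhile_cons_of_neg (by simp [h])]
      rw [show pvG [] (ch :: cs) = pvEmit [] ++ pvG [] cs from by simp [pvG, h]]
      simp [pvEmit]

lemma pvG_eq_runs : ∀ (n : Nat) (cs : List Char), cs.length ≤ n →
    pvG [] cs = ((pvBRuns cs).filter (fun t => 3 ≤ t.length)).map String.ofList := by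
  intro n
  induction n with
  | zero =>
    intro cs h
    have : cs = [] := List.eq_nil_of_length_eq_zero (Nat.le_zero.mp h)
    simp [this, pvG, pvBRuns, pvEmit]
  | succ n ih =>
    intro cs h
    match cs with
    | [] => simp [pvG, pvBRuns, pvEmit]
    | ch :: rest =>
      by_cases ha : PySem.Chars.isalnum ch
      · have hG : pvG [] (ch :: rest) = pvG [ch] rest := by simp [pvG, ha]
        rw [hG, pvG_split]
        rw [pvBRuns]
        simp only [ha, if_true]
        have hlen : (rest.dropWhile (fun d => PySem.Chars.isalnum d)).length ≤ n := by
          have := List.length_dropWhile_le (fun d => PySem.Chars.isalnum d) rest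
          simp at h; omega
        rw [ih _ hlen]
        simp only [List.filter_cons, List.singleton_append]
        split_ifs with h3
        · simp at h3; simp [pvEmit, h3]
        · simp at h3
          have hno : pvEmit (ch :: rest.takeWhile (fun d => PySem.Chars.isalnum d)) = [] := by
            unfold pvEmit
            rw [if_neg (by simp only [List.length_cons]; omega)]
          simp [hno]
      · have hG : pvG [] (ch :: rest) = pvG [] rest := by simp [pvG, ha, pvEmit]
        rw [hG, pvBRuns]
        simp only [ha, Bool.false_eq_true, if_false]
        exact ih rest (by simp at h; omega)

-- ===== VERDICT (by name: the statement is the Claim_ definition above) =====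
theorem query_tokens_py_spec : Claim_equal_query_tokens_py := by
  intro query _
  unfold Spec_query_tokens_py query_tokens_py query_tokens_py_alt
  rw [pvFold_eq, pvG_eq_runs (PySem.Chars.lower query.toList).length _ le_rfl]
  simp
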